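-- pv_equiv track=rewrite | github.com/Waldflamme/Study | Семенар 15.04/Array6.py | most_distant
-- ===== SOURCE A (Python) =====
-- def most_distant(x, y):
--     max_dist_sq = 0
--     result = (0, 0)
--
--     for x, y in zip(x, y):
--         if x < 0 and y > 0:
--             dist_sq = x**2 + y**2
--             if dist_sq > max_dist_sq:
--                 max_dist_sq = dist_sq
--                 result = (x, y)
--
--     return result
-- ===== SOURCE B (Python) =====
-- def most_distant(x, y):
--     cands = [(a, b) for a, b in zip(x, y) if a < 0 and b > 0]
--     cands.sort(key=lambda p: p[0] ** 2 + p[1] ** 2, reverse=True)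
--     return cands[0] if cands else (0, 0)
-- ===== Notes on version B (the rewrite author's own statement) =====
-- stated objective: alternative
-- what changed: Replaces A's single-pass accumulator tracking (max_dist_sq, result) with sort-then-pick: build the second-quadrant candidate list, stably sort it by squared distance in descending order, and return its first element (stability preserves A's earliest-winner tie-break), with (0,0) for the empty case.
import Mathlib
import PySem

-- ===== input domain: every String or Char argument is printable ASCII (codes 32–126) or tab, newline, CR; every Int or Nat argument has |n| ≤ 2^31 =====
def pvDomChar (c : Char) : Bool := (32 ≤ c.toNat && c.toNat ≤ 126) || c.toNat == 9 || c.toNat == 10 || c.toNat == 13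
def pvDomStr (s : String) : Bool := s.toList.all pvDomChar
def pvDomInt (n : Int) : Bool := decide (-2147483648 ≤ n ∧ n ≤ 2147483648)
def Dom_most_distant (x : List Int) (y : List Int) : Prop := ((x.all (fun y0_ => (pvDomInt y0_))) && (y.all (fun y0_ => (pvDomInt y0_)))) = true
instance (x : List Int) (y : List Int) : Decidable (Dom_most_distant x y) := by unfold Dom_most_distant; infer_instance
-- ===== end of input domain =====

-- B replaces A's accumulator loop by sort-then-pick: stable descending sort of the
-- second-quadrant candidates by squared distance, then take the first element.
-- ===== PORT A =====
def most_distant (x : List Int) (y : List Int) : Int × Int :=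
  ((x.zip y).foldl
    (fun (st : Int × (Int × Int)) p =>
      if p.1 < 0 ∧ p.2 > 0 then
        if p.1 ^ 2 + p.2 ^ 2 > st.1 then (p.1 ^ 2 + p.2 ^ 2, p) else st
      else st)
    (0, (0, 0))).2

-- ===== PORT B =====
-- B: filter the second-quadrant candidates, stable-sort descending by squared
-- distance (cands.sort(key=..., reverse=True)), return the head, else (0,0)
def most_distant_alt (x : List Int) (y : List Int) : Int × Int :=
  match PySem.List.sorted
      ((x.zip y).filter (fun p => decide (p.1 < 0) && decide (p.2 > 0)))
      (fun p => p.1 ^ 2 + p.2 ^ 2) true with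
  | [] => (0, 0)
  | m :: _ => m

-- ===== PRECONDITION & SPEC =====
def Spec_most_distant (x : List Int) (y : List Int) (out : Int × Int) : Prop := out = most_distant_alt x y
instance (x : List Int) (y : List Int) (out : Int × Int) : Decidable (Spec_most_distant x y out) := by unfold Spec_most_distant; infer_instance

-- ===== CLAIM (what is proved, stated in full; the proofs are below) =====
def Claim_equal_most_distant : Prop := ∀ (x : List Int) (y : List Int), Dom_most_distant x y → Spec_most_distant x y (most_distant x y)

-- ===== LEMMAS AND PROOFS =====

-- A's fold skips non-candidates, so it equals the same fold over the filtered list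
theorem pvA_foldl_filter (l : List (Int × Int)) (st : Int × (Int × Int)) :
    l.foldl
      (fun (st : Int × (Int × Int)) p =>
        if p.1 < 0 ∧ p.2 > 0 then
          if p.1 ^ 2 + p.2 ^ 2 > st.1 then (p.1 ^ 2 + p.2 ^ 2, p) else st
        else st) st
    = (l.filter (fun p => decide (p.1 < 0) && decide (p.2 > 0))).foldl
        (fun (st : Int × (Int × Int)) p =>
          if p.1 ^ 2 + p.2 ^ 2 > st.1 then (p.1 ^ 2 + p.2 ^ 2, p) else st) st := by
  induction l generalizing st with
  | nil => rfl
  | cons p l ih =>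
      simp only [List.foldl_cons, List.filter_cons]
      by_cases h : p.1 < 0 ∧ p.2 > 0
      · simp [h, ih]
      · have hb : ¬ ((decide (p.1 < 0) && decide (p.2 > 0)) = true) := by
          simpa [Bool.and_eq_true, decide_eq_true_eq] using h
        simp [h, hb, ih]

-- invariant: when the tracked max equals the key of the tracked result, A's fold
-- computes the first element of maximal key (strict-improvement reduction)
theorem pvInv (l : List (Int × Int)) (r : Int × Int) :
    (l.foldl
      (fun (st : Int × (Int × Int)) p =>
        if p.1 ^ 2 + p.2 ^ 2 > st.1 then (p.1 ^ 2 + p.2 ^ 2, p) else st)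
      (r.1 ^ 2 + r.2 ^ 2, r)).2
    = l.foldl (fun best p =>
        if p.1 ^ 2 + p.2 ^ 2 > best.1 ^ 2 + best.2 ^ 2 then p else best) r := by
  induction l generalizing r with
  | nil => rfl
  | cons p l ih =>
      simp only [List.foldl_cons]
      by_cases h : p.1 ^ 2 + p.2 ^ 2 > r.1 ^ 2 + r.2 ^ 2
      · simp only [if_pos h]; exact ih p
      · simp only [if_neg h]; exact ih r

-- head of the stable-descending insertion sort = first element of maximal key
theorem pvHead (l : List (Int × Int)) (h : Int × Int) (t : List (Int × Int)) :
    ∃ t', l.foldl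
        (fun acc p => PySem.List.insertBy
          (fun a b => decide ((b.1 ^ 2 + b.2 ^ 2 : Int) < a.1 ^ 2 + a.2 ^ 2)) p acc)
        (h :: t)
      = (l.foldl (fun best p =>
          if p.1 ^ 2 + p.2 ^ 2 > best.1 ^ 2 + best.2 ^ 2 then p else best) h) :: t' := by
  induction l generalizing h t with
  | nil => exact ⟨t, rfl⟩
  | cons p l ih =>
      simp only [List.foldl_cons, PySem.List.insertBy]
      by_cases hc : (h.1 ^ 2 + h.2 ^ 2 : Int) < p.1 ^ 2 + p.2 ^ 2
      · simp only [hc, decide_true, if_true]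
        exact ih p (h :: t)
      · simp only [hc, decide_false, Bool.false_eq_true, if_false]
        exact ih h _

-- ===== VERDICT (by name: the statement is the Claim_ definition above) =====
theorem most_distant_spec : Claim_equal_most_distant := by
  intro x y _
  unfold Spec_most_distant most_distant most_distant_alt
  rw [pvA_foldl_filter]
  cases hf : (x.zip y).filter (fun p => decide (p.1 < 0) && decide (p.2 > 0)) with
  | nil => simp [PySem.List.sorted]
  | cons c cs =>
      have hc : c ∈ (x.zip y).filter (fun p => decide (p.1 < 0) && decide (p.2 > 0)) := by
        rw [hf]; exact List.mem_cons_self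
      have hneg : c.1 < 0 := by
        have := (List.mem_filter.mp hc).2
        simp only [Bool.and_eq_true, decide_eq_true_eq] at this
        exact this.1
      have hpos : c.1 ^ 2 + c.2 ^ 2 > 0 := by nlinarith [sq_nonneg c.2]
      simp only [PySem.List.sorted_rev_eq_foldl_insertBy]
      simp only [List.foldl_cons, PySem.List.insertBy]
      obtain ⟨t', ht'⟩ := pvHead cs c []
      rw [ht']
      simp only [List.foldl_cons]
      rw [if_pos hpos]
      exact pvInv cs c
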